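-- pv_equiv track=rewrite | github.com/sharonliao/Web-Search-Enging | indexer/SPIMI_indexer.py | build_term_tuples
-- ===== SOURCE A (Python) =====
-- def build_term_tuples(token_stream):
--     token_stream.sort()
--     term_tuples = []
--     cur_term = token_stream[0]
--     tf = 1
--     for token in token_stream[1:]:
--         if token == cur_term:
--             tf = tf +1
--         else:
--             term_tuples.append((cur_term,tf))
--             cur_term = token
--             tf = 1
--     term_tuples.append((cur_term, tf))
--     return term_tuples
-- ===== SOURCE B (Python) =====
-- def build_term_tuples(token_stream):
--     # B: hash-count then key-sort, instead of A's run-length scan of the sorted list.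
--     # token_stream.sort() is kept only to preserve A's observable in-place mutation.
--     token_stream.sort()
--     counts = {}
--     for t in token_stream:
--         counts[t] = counts.get(t, 0) + 1
--     return sorted(counts.items(), key=lambda kv: kv[0])
-- ===== Notes on version B (the rewrite author's own statement) =====
-- stated objective: idiomatic
-- what changed: B replaces A's run-length scan over adjacent equal elements of the sorted list (cur_term/tf accumulator loop) with a hash-table count of all tokens followed by a sort of the (term, freq) items by term.
-- crash fix: On an empty token_stream A raises IndexError (it reads token_stream[0]); B returns []. — e.g. on build_term_tuples([]): A raises IndexError, B returns []
import Mathlib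
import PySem

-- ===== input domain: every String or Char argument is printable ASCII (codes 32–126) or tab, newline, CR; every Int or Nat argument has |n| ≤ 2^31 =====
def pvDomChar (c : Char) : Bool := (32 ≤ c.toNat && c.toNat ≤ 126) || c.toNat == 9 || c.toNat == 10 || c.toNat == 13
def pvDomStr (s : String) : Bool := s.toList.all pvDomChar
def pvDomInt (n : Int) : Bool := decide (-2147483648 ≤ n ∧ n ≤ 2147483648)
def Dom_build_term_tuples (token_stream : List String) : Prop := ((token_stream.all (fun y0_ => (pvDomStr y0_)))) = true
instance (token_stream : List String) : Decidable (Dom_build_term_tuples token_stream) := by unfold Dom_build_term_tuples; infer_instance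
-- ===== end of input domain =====

-- B replaces A's run-length scan of the sorted list with a hash count plus a key-sort of
-- the items (idiomatic); equivalence is about the RETURN value (both sort the argument in place).

-- ===== PORT A =====
-- the loop body of A's 'for token in token_stream[1:]' over the state (term_tuples, cur_term, tf)
def pvStepA (st : List (String × Int) × String × Int) (token : String) :
    List (String × Int) × String × Int :=
  if token = st.2.1 then (st.1, st.2.1, st.2.2 + 1)
  else (st.1 ++ [(st.2.1, st.2.2)], token, 1)

def build_term_tuples (token_stream : List String) : List (String × Int) :=
  let s := PySem.List.sorted token_stream (fun x => x) false
  match s with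
  | [] => []   -- token_stream[0] raises IndexError: excluded by Pre_
  | cur0 :: _ =>
    let r := (PySem.List.slice s (some 1) none).foldl pvStepA ([], cur0, 1)
    r.1 ++ [(r.2.1, r.2.2)]

-- ===== PORT B =====
def build_term_tuples_alt (token_stream : List String) : List (String × Int) :=
  let s := PySem.List.sorted token_stream (fun x => x) false
  let counts := s.foldl (fun (d : PySem.Dict String Int) t => d.insert t (d.getD t 0 + 1))
    PySem.Dict.empty
  PySem.List.sorted counts.items (fun kv => kv.1) false

-- ===== PRECONDITION & SPEC =====
-- Pre_ excludes only the empty list, on which A raises IndexError (token_stream[0]).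
def Pre_build_term_tuples (token_stream : List String) : Prop := token_stream ≠ []
instance (token_stream : List String) : Decidable (Pre_build_term_tuples token_stream) := by
  unfold Pre_build_term_tuples; infer_instance
def pvWitness_build_term_tuples : List String := ["b", "a", "b"]

-- On the empty token_stream A raises IndexError (it reads token_stream[0]); B returns [].
def Raises_build_term_tuples (token_stream : List String) : Prop := token_stream = []
instance (token_stream : List String) : Decidable (Raises_build_term_tuples token_stream) := by
  unfold Raises_build_term_tuples; infer_instance
def pvRaiseWitness_build_term_tuples : List String := []
def pvRaiseWitnessOut_build_term_tuples : List (String × Int) := []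

def Spec_build_term_tuples (token_stream : List String) (out : List (String × Int)) : Prop :=
  out = build_term_tuples_alt token_stream
instance (token_stream : List String) (out : List (String × Int)) :
    Decidable (Spec_build_term_tuples token_stream out) := by
  unfold Spec_build_term_tuples; infer_instance

-- ===== CLAIM (what is proved, stated in full; the proofs are below) =====
def Claim_equal_build_term_tuples : Prop := ∀ (token_stream : List String),
  Dom_build_term_tuples token_stream → Pre_build_term_tuples token_stream →
  Spec_build_term_tuples token_stream (build_term_tuples token_stream)

def Claim_raises_build_term_tuples : Prop :=
  (∀ (token_stream : List String), Dom_build_term_tuples token_stream →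
    Raises_build_term_tuples token_stream → ¬ Pre_build_term_tuples token_stream) ∧
  (Dom_build_term_tuples (pvRaiseWitness_build_term_tuples) ∧
   Raises_build_term_tuples (pvRaiseWitness_build_term_tuples) ∧
   build_term_tuples_alt (pvRaiseWitness_build_term_tuples) = pvRaiseWitnessOut_build_term_tuples)

-- ===== LEMMAS AND PROOFS =====

-- canonical grouped counts of a list: first occurrences in order, each with its total count
def pvRLE (l : List String) : List (String × Int) :=
  (PySem.Set.ofList l).map (fun k => (k, (List.count k l : Int)))

theorem pvFilter_ofList (l : List String) (p : String → Bool) :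
    (PySem.Set.ofList l).filter p = PySem.Set.ofList (l.filter p) := by
  induction l with
  | nil => rfl
  | cons a l ih =>
    by_cases hp : p a = true
    · rw [List.filter_cons_of_pos hp, PySem.Set.ofList_cons, PySem.Set.ofList_cons, ← ih]
      simp only [PySem.Set.discard, List.filter_cons_of_pos hp, List.filter_filter]
      congr 1
      apply List.filter_congr
      intro y _
      exact Bool.and_comm _ _
    · rw [List.filter_cons_of_neg hp, PySem.Set.ofList_cons, ← ih]
      simp only [PySem.Set.discard, List.filter_cons_of_neg hp, List.filter_filter]
      apply List.filter_congr
      intro y _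
      by_cases hy : y = a
      · subst hy; simp [hp]
      · simp [hy]

theorem pvOfList_sublist (l : List String) : (PySem.Set.ofList l).Sublist l := by
  induction l with
  | nil => exact List.Sublist.refl _
  | cons a l ih =>
    rw [PySem.Set.ofList_cons]
    simp only [PySem.Set.discard]
    exact List.Sublist.cons₂ a (List.Sublist.trans List.filter_sublist ih)

-- grouping a list starting at its head: peel off the head's total count
theorem pvRLE_cons (t : String) (ts : List String) :
    pvRLE (t :: ts) = (t, ((List.count t ts : Int) + 1)) ::
      pvRLE (ts.filter (fun y => !(y == t))) := by
  unfold pvRLE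
  rw [PySem.Set.ofList_cons]
  simp only [PySem.Set.discard, pvFilter_ofList, List.map_cons]
  congr 1
  · rw [List.count_cons_self]; push_cast; ring_nf
  · apply List.map_congr_left
    intro k hk
    have hk' : k ∈ ts.filter (fun y => !(y == t)) := (PySem.Set.mem_ofList _ _).mp hk
    have hkt : k ≠ t := by simpa using List.of_mem_filter hk'
    rw [List.count_cons_of_ne (Ne.symm hkt), List.count_filter (by simpa using hkt)]

-- A's loop, fully characterised on a sorted suffix
theorem pvLoopA (rest : List String) : ∀ (cur : String) (tf : Int) (acc : List (String × Int)),
    (cur :: rest).Pairwise (· ≤ ·) →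
    (rest.foldl pvStepA (acc, cur, tf)).1 ++
        [((rest.foldl pvStepA (acc, cur, tf)).2.1, (rest.foldl pvStepA (acc, cur, tf)).2.2)] =
      acc ++ (cur, tf + (List.count cur rest : Int)) ::
        pvRLE (rest.filter (fun y => !(y == cur))) := by
  induction rest with
  | nil => intro cur tf acc _; simp [pvRLE, PySem.Set.ofList]
  | cons t ts ih =>
    intro cur tf acc hs
    rcases List.pairwise_cons.mp hs with ⟨h1, h2⟩
    by_cases ht : t = cur
    · subst ht
      have hstep : pvStepA (acc, t, tf) t = (acc, t, tf + 1) := by simp [pvStepA]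
      rw [List.foldl_cons, hstep, ih t (tf + 1) acc h2]
      rw [List.count_cons_self, List.filter_cons_of_neg (by simp)]
      congr 3
      push_cast
      ring_nf
    · -- t ≠ cur: sortedness gives cur < t ≤ every element of ts, so cur ∉ t :: ts
      have hcurt : cur < t := lt_of_le_of_ne (h1 t (by simp)) (fun h => ht h.symm)
      have hts : ∀ x ∈ ts, x ≠ cur := by
        intro x hx h
        have hle := (List.pairwise_cons.mp h2).1 x hx
        have hlt : cur < x := lt_of_lt_of_le hcurt hle
        rw [h] at hlt
        exact lt_irrefl _ hlt
      have hstep : pvStepA (acc, cur, tf) t = (acc ++ [(cur, tf)], t, 1) := by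
        simp [pvStepA, ht]
      rw [List.foldl_cons, hstep, ih t 1 (acc ++ [(cur, tf)]) h2]
      have hcount0 : List.count cur (t :: ts) = 0 := by
        rw [List.count_eq_zero]
        intro h
        rcases List.mem_cons.mp h with h | h
        · exact ht h.symm
        · exact hts cur h rfl
      have hfilter : (t :: ts).filter (fun y => !(y == cur)) = t :: ts := by
        rw [List.filter_eq_self]
        intro y hy
        rcases List.mem_cons.mp hy with h | h
        · subst h; simp [ht]
        · simp [hts y h]
      rw [hcount0, hfilter, pvRLE_cons]
      simp only [List.append_assoc, List.singleton_append, Nat.cast_zero, add_zero]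
      congr 3
      push_cast
      ring_nf

-- the sorted list's grouped counts have strictly increasing keys
theorem pvRLE_keys_lt (s : List String) (hs : s.Pairwise (· ≤ ·)) :
    (pvRLE s).Pairwise (fun a b => a.1 < b.1) := by
  have hle : (PySem.Set.ofList s).Pairwise (· ≤ ·) :=
    List.Pairwise.sublist (pvOfList_sublist s) hs
  have hne : (PySem.Set.ofList s).Pairwise (· ≠ ·) := PySem.Set.nodup_ofList s
  have hlt : (PySem.Set.ofList s).Pairwise (· < ·) :=
    (hle.and hne).imp (fun h => lt_of_le_of_ne h.1 h.2)
  unfold pvRLE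
  exact List.pairwise_map.mpr (hlt.imp (fun h => h))

-- main equivalence
theorem pvMain (token_stream : List String) (h : token_stream ≠ []) :
    build_term_tuples token_stream = build_term_tuples_alt token_stream := by
  have hs : (PySem.List.sorted token_stream (fun x => x) false).Pairwise (· ≤ ·) :=
    PySem.List.sorted_pairwise token_stream (fun x => x)
  have hsne : PySem.List.sorted token_stream (fun x => x) false ≠ [] := by
    intro hnil
    exact h ((PySem.List.sorted_eq_nil_iff _ _ _).mp hnil)
  obtain ⟨c, rest, hcr⟩ := List.exists_cons_of_ne_nil hsne
  rw [hcr] at hs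
  -- A's side
  have hA : build_term_tuples token_stream = pvRLE (c :: rest) := by
    unfold build_term_tuples
    rw [hcr]
    simp only [PySem.List.slice_from_one, List.tail_cons]
    rw [pvLoopA rest c 1 [] hs, pvRLE_cons]
    simp only [List.nil_append]
    congr 2
    ring_nf
  -- B's side
  have hB : build_term_tuples_alt token_stream = pvRLE (c :: rest) := by
    simp only [build_term_tuples_alt]
    rw [PySem.Dict.foldl_insert_getD_add_one_eq_counter, hcr, PySem.Dict.items_counter]
    exact PySem.List.sorted_eq_of_perm_of_pairwise_lt _ _ _ (List.Perm.refl _)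
      (pvRLE_keys_lt (c :: rest) hs)
  rw [hA, hB]

-- ===== VERDICT (by name: the statement is the Claim_ definition above) =====
theorem build_term_tuples_spec : Claim_equal_build_term_tuples := by
  intro ts _ hpre
  unfold Spec_build_term_tuples
  exact pvMain ts hpre

theorem build_term_tuples_raises : Claim_raises_build_term_tuples := by
  unfold Claim_raises_build_term_tuples
  exact ⟨fun ts _ hr hp => hp hr, by decide⟩

-- self-check: the value B returns where A raises, read off build_term_tuples_raises
theorem pvRaiseWitnessOut_ok :
    build_term_tuples_alt pvRaiseWitness_build_term_tuples = pvRaiseWitnessOut_build_term_tuples :=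
  build_term_tuples_raises.2.2.2
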